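-- pv_equiv track=rewrite | github.com/aoiymk/hackerrank | richie-rich/richie_rich.py | get_nro_not_palindrome_cases
-- ===== SOURCE A (Python) =====
-- def get_nro_not_palindrome_cases(arr):
--     np_cases =0
--     start = 0
--     end = len(arr)-1
--     while start <= end:
--         if arr[start] != arr[end]:
--             np_cases = np_cases+1
--         start = start +1
--         end = end - 1
--     return np_cases
-- ===== SOURCE B (Python) =====
-- def get_nro_not_palindrome_cases(arr):
--     # Single reversed-copy pass: every mismatched symmetric pair is counted twice, so halve.
--     return sum(a != b for a, b in zip(arr, arr[::-1])) // 2
-- ===== Notes on version B (the rewrite author's own statement) =====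
-- stated objective: idiomatic
-- what changed: Replaces the converging two-pointer while loop with a one-liner that zips the list with its reversed copy, sums all mismatched positions, and halves the double-counted total.
import Mathlib
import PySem

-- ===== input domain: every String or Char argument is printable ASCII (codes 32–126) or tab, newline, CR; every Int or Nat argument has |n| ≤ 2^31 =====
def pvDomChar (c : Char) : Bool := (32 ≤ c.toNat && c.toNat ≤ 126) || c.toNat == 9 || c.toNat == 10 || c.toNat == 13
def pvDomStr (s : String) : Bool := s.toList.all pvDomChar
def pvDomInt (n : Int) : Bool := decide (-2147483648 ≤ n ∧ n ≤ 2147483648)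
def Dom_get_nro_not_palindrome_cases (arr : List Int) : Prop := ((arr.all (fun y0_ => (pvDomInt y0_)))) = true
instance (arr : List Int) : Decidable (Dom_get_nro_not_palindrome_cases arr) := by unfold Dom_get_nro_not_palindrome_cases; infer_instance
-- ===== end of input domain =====

-- B replaces the converging two-pointer loop with one pass over the list zipped with its
-- reversed copy, halving the double-counted mismatch total (objective: idiomatic).

-- ===== PORT A =====
-- the while loop of A: converging pointers start/e, accumulator np
def pvLoopA (arr : List Int) (start e np : Int) : Int :=
  if start ≤ e then
    pvLoopA arr (start + 1) (e - 1)
      (if PySem.List.pyGet? arr start ≠ PySem.List.pyGet? arr e then np + 1 else np)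
  else np
termination_by (e + 1 - start).toNat
decreasing_by omega

def get_nro_not_palindrome_cases (arr : List Int) : Int :=
  pvLoopA arr 0 ((arr.length : Int) - 1) 0

-- ===== PORT B =====
def get_nro_not_palindrome_cases_alt (arr : List Int) : Int :=
  -- arr[::-1]; the step is the literal -1, so slice? never returns none
  let rev := (PySem.List.slice? arr none none (-1)).getD []
  PySem.Int.floordiv
    ((arr.zip rev).foldl (fun acc p => acc + (if p.1 ≠ p.2 then 1 else 0)) 0) 2

-- ===== PRECONDITION & SPEC =====
def Spec_get_nro_not_palindrome_cases (arr : List Int) (out : Int) : Prop := out = get_nro_not_palindrome_cases_alt arr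
instance (arr : List Int) (out : Int) : Decidable (Spec_get_nro_not_palindrome_cases arr out) := by unfold Spec_get_nro_not_palindrome_cases; infer_instance

-- ===== CLAIM (what is proved, stated in full; the proofs are below) =====
def Claim_equal_get_nro_not_palindrome_cases : Prop := ∀ (arr : List Int), Dom_get_nro_not_palindrome_cases arr → Spec_get_nro_not_palindrome_cases arr (get_nro_not_palindrome_cases arr)

-- ===== LEMMAS AND PROOFS =====

/-- mismatch indicator at position `i` against its mirror position -/
def pvMism (arr : List Int) (i : ℕ) : Int :=
  if PySem.List.pyGet? arr (i : Int) ≠ PySem.List.pyGet? arr ((arr.length : Int) - 1 - (i : Int)) then 1 else 0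

lemma pvMism_symm (arr : List Int) (i : ℕ) (hi : i < arr.length) :
    pvMism arr (arr.length - 1 - i) = pvMism arr i := by
  unfold pvMism
  have h1 : ((arr.length - 1 - i : ℕ) : Int) = (arr.length : Int) - 1 - (i : Int) := by omega
  have h2 : (arr.length : Int) - 1 - ((arr.length - 1 - i : ℕ) : Int) = (i : Int) := by omega
  rw [h1, show (arr.length : Int) - 1 - ((arr.length : Int) - 1 - (i : Int)) = (i : Int) from by ring]
  by_cases h : PySem.List.pyGet? arr (i : Int) = PySem.List.pyGet? arr ((arr.length : Int) - 1 - (i : Int)) <;>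
    simp [h, Ne, eq_comm]

lemma pvMism_mid (arr : List Int) (i : ℕ) (h : (arr.length : Int) - 1 - (i : Int) = (i : Int)) :
    pvMism arr i = 0 := by
  unfold pvMism
  rw [h]
  simp

/-- the two-pointer loop, doubled, equals the full mismatch sum over the window [s, n-s) -/
lemma pvLoopA_eq (arr : List Int) :
    ∀ (k s : ℕ) (np : Int), arr.length - s = k → s ≤ arr.length →
      2 * pvLoopA arr (s : Int) ((arr.length : Int) - 1 - (s : Int)) np
        = 2 * np + ∑ i ∈ Finset.Ico s (arr.length - s), pvMism arr i := by
  intro k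
  induction k using Nat.strong_induction_on with
  | _ k ih =>
    intro s np hk hs
    rw [pvLoopA]
    by_cases h : (s : Int) ≤ (arr.length : Int) - 1 - (s : Int)
    · simp only [if_pos h]
      have hs1 : s + 1 ≤ arr.length := by omega
      have harg : (arr.length : Int) - 1 - (s : Int) - 1 = (arr.length : Int) - 1 - ((s + 1 : ℕ) : Int) := by
        push_cast; ring
      have hcast : ((s : ℕ) : Int) + 1 = ((s + 1 : ℕ) : Int) := by push_cast; ring
      rw [harg, hcast, ih (arr.length - (s + 1)) (by omega) (s + 1) _ rfl hs1]
      have hnp : (if PySem.List.pyGet? arr (s : Int) ≠ PySem.List.pyGet? arr ((arr.length : Int) - 1 - (s : Int)) then np + 1 else np)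
          = np + pvMism arr s := by
        unfold pvMism; split_ifs <;> omega
      rw [hnp]
      by_cases h2 : s < arr.length - s - 1
      · -- at least two elements in the window: peel both ends
        obtain ⟨m, hm⟩ : ∃ m, arr.length - s = m + 1 := ⟨arr.length - s - 1, by omega⟩
        have htop : ∑ i ∈ Finset.Ico s (arr.length - s), pvMism arr i
            = (∑ i ∈ Finset.Ico s m, pvMism arr i) + pvMism arr m := by
          rw [hm, Finset.sum_Ico_succ_top (by omega)]
        have hbot : ∑ i ∈ Finset.Ico s m, pvMism arr i
            = pvMism arr s + ∑ i ∈ Finset.Ico (s + 1) m, pvMism arr i := by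
          rw [Finset.sum_eq_sum_Ico_succ_bot (by omega)]
        have hsym : pvMism arr m = pvMism arr s := by
          have := pvMism_symm arr s (by omega)
          have he : arr.length - 1 - s = m := by omega
          rw [he] at this; exact this
        have hidx : arr.length - (s + 1) = m := by omega
        rw [htop, hbot, hsym, hidx]
        ring
      · -- window is a single middle element: its mismatch is 0
        have hmid : (arr.length : Int) - 1 - (s : Int) = (s : Int) := by omega
        have h0 : pvMism arr s = 0 := pvMism_mid arr s hmid
        have hwin : arr.length - s = s + 1 := by omega
        have hempty : Finset.Ico (s + 1) (arr.length - (s + 1)) = ∅ := by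
          apply Finset.Ico_eq_empty; omega
        rw [hwin, hempty, Finset.sum_empty, Finset.sum_Ico_eq_sum_range]
        simp [h0]
    · simp only [if_neg h]
      have hempty : Finset.Ico s (arr.length - s) = ∅ := by
        apply Finset.Ico_eq_empty; omega
      rw [hempty, Finset.sum_empty]; omega

lemma pvFoldl_sum (f : Int × Int → Int) :
    ∀ (l : List (Int × Int)) (c : Int), l.foldl (fun acc p => acc + f p) c = c + (l.map f).sum := by
  intro l
  induction l with
  | nil => intro c; simp
  | cons x xs ih => intro c; simp [List.foldl_cons, ih, add_assoc]

lemma pvList_sum_eq (l : List Int) : l.sum = ∑ i ∈ Finset.range l.length, l.getD i 0 := by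
  induction l with
  | nil => simp
  | cons x xs ih =>
    rw [List.sum_cons, ih, List.length_cons, Finset.sum_range_succ']
    simp only [List.getD, List.getElem?_cons_succ, List.getElem?_cons_zero, Option.getD_some]
    ring

lemma pvZip_sum (arr : List Int) :
    ((arr.zip arr.reverse).map (fun p => if p.1 ≠ p.2 then (1 : Int) else 0)).sum
      = ∑ i ∈ Finset.range arr.length, pvMism arr i := by
  rw [pvList_sum_eq]
  have hlen : ((arr.zip arr.reverse).map (fun p => if p.1 ≠ p.2 then (1 : Int) else 0)).length = arr.length := by
    simp
  rw [hlen]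
  apply Finset.sum_congr rfl
  intro i hi
  rw [Finset.mem_range] at hi
  have hi2 : i < ((arr.zip arr.reverse).map (fun p => if p.1 ≠ p.2 then (1 : Int) else 0)).length := by
    rw [hlen]; exact hi
  rw [List.getD_eq_getElem _ _ hi2, List.getElem_map, List.getElem_zip, List.getElem_reverse]
  unfold pvMism
  have hg1 : PySem.List.pyGet? arr (i : Int) = some arr[i] := by
    rw [PySem.List.pyGet?_natCast, List.getElem?_eq_getElem hi]
  have hc : (arr.length : Int) - 1 - (i : Int) = ((arr.length - 1 - i : ℕ) : Int) := by omega
  have hi3 : arr.length - 1 - i < arr.length := by omega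
  have hg2 : PySem.List.pyGet? arr ((arr.length : Int) - 1 - (i : Int)) = some arr[arr.length - 1 - i] := by
    rw [hc, PySem.List.pyGet?_natCast, List.getElem?_eq_getElem hi3]
  rw [hg1, hg2]
  by_cases h : arr[i] = arr[arr.length - 1 - i] <;> simp [h]

-- ===== VERDICT (by name: the statement is the Claim_ definition above) =====
theorem get_nro_not_palindrome_cases_spec : Claim_equal_get_nro_not_palindrome_cases := by
  intro arr _
  unfold Spec_get_nro_not_palindrome_cases get_nro_not_palindrome_cases get_nro_not_palindrome_cases_alt
  rw [PySem.List.slice?_none_none_neg_one]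
  simp only [Option.getD_some]
  rw [pvFoldl_sum, pvZip_sum, zero_add]
  have key := pvLoopA_eq arr arr.length 0 0 (by omega) (by omega)
  have h0 : ((0 : ℕ) : Int) = 0 := rfl
  rw [h0] at key
  have hr : (arr.length : Int) - 1 - 0 = (arr.length : Int) - 1 := by ring
  rw [hr] at key
  simp only [Nat.sub_zero, mul_zero, zero_add] at key
  have hsum : ∑ i ∈ Finset.range arr.length, pvMism arr i
      = 2 * pvLoopA arr 0 ((arr.length : Int) - 1) 0 := by
    rw [Finset.range_eq_Ico]; omega
  rw [hsum, PySem.Int.floordiv_eq_ediv_of_pos (by omega)]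
  omega
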